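-- pv_equiv track=rewrite | github.com/alexanderwanyoike/the0 | services/0vers33r/src/analyzer.py | _should_scan_file
-- ===== SOURCE A (Python) =====
-- def _should_scan_file(filename: str, runtime: str = "unknown") -> bool:
--     """Determine if file should be scanned based on runtime"""
--
--     # Common extensions for all runtimes
--     common_extensions = {".json", ".yaml", ".yml", ".sh", ".bat", ".txt", ".md"}
--
--     # Runtime-specific extensions
--     if runtime == "python3.11":
--         python_extensions = {".py", ".pyx", ".pyi"}
--         scan_extensions = common_extensions.union(python_extensions)
--     elif runtime == "nodejs20":
--         js_extensions = {".js", ".ts", ".jsx", ".tsx", ".mjs", ".cjs"}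
--         scan_extensions = common_extensions.union(js_extensions)
--     else:
--         # Default to scanning all supported extensions
--         scan_extensions = {
--             ".py", ".js", ".ts", ".jsx", ".tsx", ".mjs", ".cjs",
--             ".json", ".yaml", ".yml", ".sh", ".bat", ".txt", ".md"
--         }
--
--     return any(filename.lower().endswith(ext) for ext in scan_extensions)
-- ===== SOURCE B (Python) =====
-- def _should_scan_file(filename: str, runtime: str = "unknown") -> bool:
--     """Determine if file should be scanned based on runtime"""
--     name = filename.lower()
--     dot = name.rfind(".")
--     if dot == -1:
--         return False
--     ext = name[dot:]
--     if ext in (".json", ".yaml", ".yml", ".sh", ".bat", ".txt", ".md"):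
--         return True
--     if runtime == "python3.11":
--         return ext in (".py", ".pyx", ".pyi")
--     if runtime == "nodejs20":
--         return ext in (".js", ".ts", ".jsx", ".tsx", ".mjs", ".cjs")
--     return ext == ".py" or ext in (".js", ".ts", ".jsx", ".tsx", ".mjs", ".cjs")
-- ===== Notes on version B (the rewrite author's own statement) =====
-- stated objective: idiomatic
-- what changed: B parses the filename's own extension once (lower-case, rfind the last dot, slice the suffix) and decides by direct membership tests with early returns per runtime, instead of A's building a runtime-dependent set and scanning every candidate extension with endswith.
import Mathlib
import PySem

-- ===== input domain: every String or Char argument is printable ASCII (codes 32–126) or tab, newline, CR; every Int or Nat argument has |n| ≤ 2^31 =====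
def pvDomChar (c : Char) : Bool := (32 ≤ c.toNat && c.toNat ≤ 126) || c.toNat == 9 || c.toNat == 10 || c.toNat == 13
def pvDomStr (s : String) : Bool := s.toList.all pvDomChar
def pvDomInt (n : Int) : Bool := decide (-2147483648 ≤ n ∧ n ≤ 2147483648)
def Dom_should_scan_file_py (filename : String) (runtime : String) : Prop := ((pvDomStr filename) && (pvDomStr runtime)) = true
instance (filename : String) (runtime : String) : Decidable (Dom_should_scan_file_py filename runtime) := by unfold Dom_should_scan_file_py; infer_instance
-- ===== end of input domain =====

-- B parses the filename's own extension once (lower-case, rfind the last dot, slice the suffix)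
-- and decides by direct membership tests with early returns per runtime, instead of A's building
-- a runtime-dependent extension set and scanning every candidate with endswith (idiomatic).


-- ===== PORT A =====
def should_scan_file_py (filename : String) (runtime : String) : Bool :=
  let common_extensions : PySem.Set String :=
    PySem.Set.ofList [".json", ".yaml", ".yml", ".sh", ".bat", ".txt", ".md"]
  let scan_extensions : PySem.Set String :=
    if runtime == "python3.11" then
      let python_extensions : PySem.Set String := PySem.Set.ofList [".py", ".pyx", ".pyi"]
      PySem.Set.union common_extensions python_extensions
    else if runtime == "nodejs20" then
      let js_extensions : PySem.Set String :=
        PySem.Set.ofList [".js", ".ts", ".jsx", ".tsx", ".mjs", ".cjs"]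
      PySem.Set.union common_extensions js_extensions
    else
      PySem.Set.ofList [".py", ".js", ".ts", ".jsx", ".tsx", ".mjs", ".cjs",
                        ".json", ".yaml", ".yml", ".sh", ".bat", ".txt", ".md"]
  -- any(...) over a set: the result is order-independent, so iterating the Set's list is exact
  scan_extensions.any (fun ext => PySem.Str.endswith (PySem.Str.lower filename) ext)

-- ===== PORT B =====
def should_scan_file_py_alt (filename : String) (runtime : String) : Bool :=
  let name := PySem.Str.lower filename
  let dot := PySem.Str.rfind name "."
  if dot == -1 then
    false
  else
    let ext := PySem.Str.slice name (some dot) none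
    if [".json", ".yaml", ".yml", ".sh", ".bat", ".txt", ".md"].contains ext then
      true
    else if runtime == "python3.11" then
      [".py", ".pyx", ".pyi"].contains ext
    else if runtime == "nodejs20" then
      [".js", ".ts", ".jsx", ".tsx", ".mjs", ".cjs"].contains ext
    else
      ext == ".py" || [".js", ".ts", ".jsx", ".tsx", ".mjs", ".cjs"].contains ext

-- ===== PRECONDITION & SPEC =====
def Spec_should_scan_file_py (filename : String) (runtime : String) (out : Bool) : Prop := out = should_scan_file_py_alt filename runtime
instance (filename : String) (runtime : String) (out : Bool) : Decidable (Spec_should_scan_file_py filename runtime out) := by unfold Spec_should_scan_file_py; infer_instance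

-- ===== CLAIM (what is proved, stated in full; the proofs are below) =====
def Claim_equal_should_scan_file_py : Prop := ∀ (filename : String) (runtime : String), Dom_should_scan_file_py filename runtime → Spec_should_scan_file_py filename runtime (should_scan_file_py filename runtime)

-- ===== LEMMAS AND PROOFS =====

-- spec helper: the suffix of l starting at its last '.', if any
def pvExt? : List Char → Option (List Char)
  | [] => none
  | a :: t =>
    match pvExt? t with
    | some e => some e
    | none => if a = '.' then some (a :: t) else none

-- spec helper: the index of the last occurrence of c in l, or -1
def pvLastIdx (c : Char) : List Char → Int
  | [] => -1
  | a :: t =>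
    let r := pvLastIdx c t
    if r = -1 then (if a = c then 0 else -1) else r + 1

theorem pvExt?_none_iff (l : List Char) : pvExt? l = none ↔ '.' ∉ l := by
  induction l with
  | nil => simp [pvExt?]
  | cons a t ih =>
    simp only [pvExt?, List.mem_cons]
    cases h : pvExt? t with
    | some e =>
      rw [h] at ih
      have hmem : '.' ∈ t := by
        by_contra hc
        simpa using ih.mpr hc
      simp [hmem]
    | none =>
      rw [h] at ih
      have hnt : '.' ∉ t := ih.mp rfl
      by_cases ha : a = '.' <;> simp [ha, hnt]
      exact fun hc => ha hc.symm

theorem pvSuffix_iff (t : List Char) (ht : '.' ∉ t) (l : List Char) :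
    ('.' :: t <:+ l) ↔ pvExt? l = some ('.' :: t) := by
  induction l with
  | nil => simp [pvExt?]
  | cons a l ih =>
    rw [List.suffix_cons_iff]
    simp only [pvExt?]
    cases h : pvExt? l with
    | some e =>
      simp only [Option.some.injEq]
      constructor
      · rintro (he | hs)
        · have hl : l = t := by cases he; rfl
          have hnone : pvExt? l = none := (pvExt?_none_iff l).mpr (hl ▸ ht)
          rw [hnone] at h; cases h
        · have := ih.mp hs; rw [h] at this
          exact Option.some.injEq _ _ ▸ this
      · intro hee; exact Or.inr (ih.mpr (by rw [h, hee]))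
    | none =>
      constructor
      · rintro (he | hs)
        · have ha : a = '.' := by cases he; rfl
          have hl : l = t := by cases he; rfl
          simp [ha, hl]
        · have := ih.mp hs; rw [h] at this; cases this
      · intro hee
        by_cases ha : a = '.'
        · left
          have hlt : ('.' : Char) :: l = '.' :: t := by simpa [ha] using hee
          rw [ha, hlt]
        · simp [ha] at hee

theorem pvLastIdx_cases (c : Char) (l : List Char) :
    pvLastIdx c l = -1 ∨ 0 ≤ pvLastIdx c l := by
  induction l with
  | nil => simp [pvLastIdx]
  | cons a t ih =>
    simp only [pvLastIdx]
    by_cases h : pvLastIdx c t = -1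
    · by_cases ha : a = c <;> simp [h, ha]
    · rcases ih with h' | h'
      · exact absurd h' h
      · simp only [if_neg h]; omega

theorem pvLastIdx_neg_one_iff (c : Char) (l : List Char) : pvLastIdx c l = -1 ↔ c ∉ l := by
  induction l with
  | nil => simp [pvLastIdx]
  | cons a t ih =>
    simp only [pvLastIdx, List.mem_cons]
    by_cases h : pvLastIdx c t = -1
    · have hnt : c ∉ t := ih.mp h
      by_cases ha : a = c <;> simp [h, ha, hnt]
      exact fun hc => ha hc.symm
    · have hmt : c ∈ t := by by_contra hc; exact h (ih.mpr hc)
      rcases pvLastIdx_cases c t with h' | h'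
      · exact absurd h' h
      · simp only [if_neg h]
        constructor
        · intro habs; omega
        · intro hc; exact absurd (Or.inr hmt) hc

theorem pvLastIdx_of (c : Char) (l : List Char) :
    ∀ k : Nat, l[k]? = some c → (∀ j : Nat, k < j → l[j]? ≠ some c) →
      pvLastIdx c l = (k : Int) := by
  induction l with
  | nil => intro k hk _; simp at hk
  | cons a t ih =>
    intro k hk hnone
    cases k with
    | zero =>
      have ha : a = c := by simpa using hk
      have hnt : c ∉ t := by
        intro hmem
        obtain ⟨j, hj, hje⟩ := List.getElem_of_mem hmem
        exact hnone (j + 1) (Nat.succ_pos j) (by simpa using List.getElem?_eq_some_iff.mpr ⟨hj, hje⟩)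
      simp [pvLastIdx, (pvLastIdx_neg_one_iff c t).mpr hnt, ha]
    | succ k' =>
      have ht : t[k']? = some c := by simpa using hk
      have hnt : ∀ j : Nat, k' < j → t[j]? ≠ some c := by
        intro j hj
        have := hnone (j + 1) (by omega)
        simpa using this
      have hr := ih k' ht hnt
      simp only [pvLastIdx, hr]
      rw [if_neg (by omega : ¬((k' : Int) = -1))]
      omega

theorem pvPrefix_single (c : Char) (s : List Char) :
    [c].isPrefixOf s = true ↔ s.head? = some c := by
  cases s with
  | nil => simp [List.isPrefixOf]
  | cons b s' => simp [List.isPrefixOf]; exact ⟨fun h => h.symm, fun h => h.symm⟩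

theorem pvGo_eq (l : List Char) (c : Char) :
    ∀ n : Nat, (∀ j : Nat, n < j → l[j]? ≠ some c) →
      PySem.Chars.rfind.go l [c] n = pvLastIdx c l := by
  intro n
  induction n with
  | zero =>
    intro h
    show (if [c].isPrefixOf l = true then (0 : Int) else -1) = pvLastIdx c l
    by_cases h0 : l[0]? = some c
    · have hh : l.head? = l[0]? := by cases l <;> simp
      rw [if_pos ((pvPrefix_single c l).mpr (hh ▸ h0))]
      exact (pvLastIdx_of c l 0 h0 h).symm
    · have hnc : c ∉ l := by
        intro hmem
        obtain ⟨j, hj, hje⟩ := List.getElem_of_mem hmem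
        have hjq : l[j]? = some c := List.getElem?_eq_some_iff.mpr ⟨hj, hje⟩
        cases j with
        | zero => exact h0 hjq
        | succ j' => exact h (j' + 1) (Nat.succ_pos j') hjq
      have hh : l.head? = l[0]? := by cases l <;> simp
      rw [if_neg (by rw [pvPrefix_single, hh]; exact h0)]
      exact ((pvLastIdx_neg_one_iff c l).mpr hnc).symm
  | succ n' ih =>
    intro h
    show (if [c].isPrefixOf (List.drop (n' + 1) l) = true then ((n' : Int) + 1) else PySem.Chars.rfind.go l [c] n') = pvLastIdx c l
    by_cases hn : l[n' + 1]? = some c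
    · rw [if_pos ((pvPrefix_single c _).mpr (by rw [List.head?_drop]; exact hn))]
      have := pvLastIdx_of c l (n' + 1) hn (fun j hj => h j hj)
      rw [this]; omega
    · rw [if_neg (by rw [pvPrefix_single, List.head?_drop]; exact hn)]
      refine ih (fun j hj => ?_)
      by_cases hj2 : j = n' + 1
      · rw [hj2]; exact hn
      · exact h j (by omega)

theorem pvRfind_eq (l : List Char) (c : Char) :
    PySem.Chars.rfind l [c] = pvLastIdx c l := by
  show PySem.Chars.rfind.go l [c] l.length = pvLastIdx c l
  exact pvGo_eq l c l.length (fun j hj => by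
    rw [List.getElem?_eq_none (by omega)]; simp)

theorem pvExt?_some_spec (l : List Char) :
    ∀ e : List Char, pvExt? l = some e →
      e.length ≤ l.length ∧ pvLastIdx '.' l = ((l.length - e.length : Nat) : Int) ∧
        List.drop (l.length - e.length) l = e := by
  induction l with
  | nil => intro e he; simp [pvExt?] at he
  | cons a t ih =>
    intro e he
    simp only [pvExt?] at he
    cases h : pvExt? t with
    | some e' =>
      rw [h] at he
      have hee : e' = e := by simpa using he
      obtain ⟨hle, hli, hdrop⟩ := ih e (hee ▸ h)
      have hne : pvLastIdx '.' t ≠ -1 := by rw [hli]; omega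
      refine ⟨by simp; omega, ?_, ?_⟩
      · have hki : ¬ ((t.length - e.length : Nat) : Int) = -1 := by omega
        simp only [pvLastIdx, hli, if_neg hki, List.length_cons]
        omega
      · have hstep : (a :: t).length - e.length = (t.length - e.length) + 1 := by
          simp; omega
        rw [hstep, List.drop_succ_cons, hdrop]
    | none =>
      rw [h] at he
      by_cases ha : a = '.'
      · have he' : e = a :: t := by
          rw [if_pos ha] at he; simpa using he.symm
        have hnt : '.' ∉ t := (pvExt?_none_iff t).mp h
        have hti : pvLastIdx '.' t = -1 := (pvLastIdx_neg_one_iff '.' t).mpr hnt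
        refine ⟨by simp [he'], ?_, ?_⟩
        · simp [pvLastIdx, hti, ha, he']
        · simp [he']
      · rw [if_neg ha] at he; cases he

theorem pv_main (l : List Char) (S : List String)
    (hS : ∀ s ∈ S, s.toList.head? = some '.' ∧ '.' ∉ s.toList.tail) :
    S.any (fun ext => PySem.Chars.endswith l ext.toList)
      = ((PySem.Chars.rfind l ['.'] != -1) &&
         S.contains (String.ofList
           (PySem.Chars.slice l (some (PySem.Chars.rfind l ['.'])) none))) := by
  rw [pvRfind_eq]
  have hform : ∀ s ∈ S, s.toList = '.' :: s.toList.tail := by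
    intro s hs
    have := (hS s hs).1
    cases hsl : s.toList with
    | nil => rw [hsl] at this; cases this
    | cons b u => rw [hsl] at this; simp at this; simp [this]
  cases h : pvExt? l with
  | none =>
    have hni : pvLastIdx '.' l = -1 := (pvLastIdx_neg_one_iff '.' l).mpr ((pvExt?_none_iff l).mp h)
    rw [hni]
    have hrhs : ((-1 : Int) != -1) = false := by decide
    rw [hrhs, Bool.false_and]
    rw [List.any_eq_false]
    intro s hs
    rw [Bool.not_eq_true, ← Bool.not_eq_true]
    intro htrue
    rw [PySem.Chars.endswith_iff] at htrue
    rw [hform s hs] at htrue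
    rw [pvSuffix_iff _ (hS s hs).2 l] at htrue
    rw [h] at htrue; cases htrue
  | some e =>
    obtain ⟨hle, hli, hdrop⟩ := pvExt?_some_spec l e h
    rw [hli]
    have h1 : (((l.length - e.length : Nat) : Int) != -1) = true := by
      simp only [bne_iff_ne, ne_eq]; omega
    rw [h1, Bool.true_and]
    have h2 : PySem.Chars.slice l (some ((l.length - e.length : Nat) : Int)) none = e := by
      rw [PySem.Chars.slice_eq_listSlice, PySem.List.slice_from_natCast, hdrop]
    rw [h2]
    rw [Bool.eq_iff_iff, List.any_eq_true, List.contains_iff_mem]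
    constructor
    · rintro ⟨s, hs, hsw⟩
      rw [PySem.Chars.endswith_iff, hform s hs, pvSuffix_iff _ (hS s hs).2 l, h] at hsw
      have : s.toList = e := by
        rw [hform s hs]; exact (Option.some.injEq _ _ ▸ hsw).symm
      rw [← this, String.ofList_toList]
      exact hs
    · intro hmem
      refine ⟨String.ofList e, hmem, ?_⟩
      have he : e = '.' :: e.tail := by
        have h3 := hform _ hmem; rwa [String.toList_ofList] at h3
      have ht : '.' ∉ e.tail := by
        have h4 := (hS _ hmem).2; rwa [String.toList_ofList] at h4
      rw [PySem.Chars.endswith_iff, hform _ hmem, String.toList_ofList, pvSuffix_iff _ ht l, h, ← he]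

-- pv_main restated at the String level (each side is a definitional unfolding)
theorem pv_mainS (name : String) (S : List String)
    (hS : ∀ s ∈ S, s.toList.head? = some '.' ∧ '.' ∉ s.toList.tail) :
    S.any (fun ext => PySem.Str.endswith name ext)
      = ((PySem.Str.rfind name "." != -1) &&
         S.contains (PySem.Str.slice name (some (PySem.Str.rfind name ".")) none)) :=
  pv_main name.toList S hS

-- Boolean bridges: "membership in the merged list" = B's early-return decision chain
theorem pvBridge_py (d : Int) (e : String) :
    ((d != -1) && ([".json", ".yaml", ".yml", ".sh", ".bat", ".txt", ".md",
                    ".py", ".pyx", ".pyi"] : List String).contains e)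
      = if (d == -1) = true then false
        else if ([".json", ".yaml", ".yml", ".sh", ".bat", ".txt", ".md"] : List String).contains e = true then true
        else ([".py", ".pyx", ".pyi"] : List String).contains e := by
  by_cases hd : d = -1
  · rw [hd, if_pos (by decide), show ((-1 : Int) != -1) = false from rfl, Bool.false_and]
  · rw [if_neg (by rw [beq_iff_eq]; exact hd)]
    rw [show (d != -1) = true by rw [bne_iff_ne]; exact hd, Bool.true_and]
    split_ifs with hc
    · rw [Bool.eq_iff_iff]
      simp only [List.contains_cons, List.contains_nil, Bool.or_false,
        Bool.or_eq_true, beq_iff_eq] at hc ⊢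
      tauto
    · rw [Bool.eq_iff_iff]
      simp only [List.contains_cons, List.contains_nil, Bool.or_false,
        Bool.or_eq_true, beq_iff_eq] at hc ⊢
      tauto

theorem pvBridge_js (d : Int) (e : String) :
    ((d != -1) && ([".json", ".yaml", ".yml", ".sh", ".bat", ".txt", ".md",
                    ".js", ".ts", ".jsx", ".tsx", ".mjs", ".cjs"] : List String).contains e)
      = if (d == -1) = true then false
        else if ([".json", ".yaml", ".yml", ".sh", ".bat", ".txt", ".md"] : List String).contains e = true then true
        else ([".js", ".ts", ".jsx", ".tsx", ".mjs", ".cjs"] : List String).contains e := by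
  by_cases hd : d = -1
  · rw [hd, if_pos (by decide), show ((-1 : Int) != -1) = false from rfl, Bool.false_and]
  · rw [if_neg (by rw [beq_iff_eq]; exact hd)]
    rw [show (d != -1) = true by rw [bne_iff_ne]; exact hd, Bool.true_and]
    split_ifs with hc
    · rw [Bool.eq_iff_iff]
      simp only [List.contains_cons, List.contains_nil, Bool.or_false,
        Bool.or_eq_true, beq_iff_eq] at hc ⊢
      tauto
    · rw [Bool.eq_iff_iff]
      simp only [List.contains_cons, List.contains_nil, Bool.or_false,
        Bool.or_eq_true, beq_iff_eq] at hc ⊢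
      tauto

theorem pvBridge_def (d : Int) (e : String) :
    ((d != -1) && ([".py", ".js", ".ts", ".jsx", ".tsx", ".mjs", ".cjs",
                    ".json", ".yaml", ".yml", ".sh", ".bat", ".txt", ".md"] : List String).contains e)
      = if (d == -1) = true then false
        else if ([".json", ".yaml", ".yml", ".sh", ".bat", ".txt", ".md"] : List String).contains e = true then true
        else (e == ".py" || ([".js", ".ts", ".jsx", ".tsx", ".mjs", ".cjs"] : List String).contains e) := by
  by_cases hd : d = -1
  · rw [hd, if_pos (by decide), show ((-1 : Int) != -1) = false from rfl, Bool.false_and]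
  · rw [if_neg (by rw [beq_iff_eq]; exact hd)]
    rw [show (d != -1) = true by rw [bne_iff_ne]; exact hd, Bool.true_and]
    split_ifs with hc
    · rw [Bool.eq_iff_iff]
      simp only [List.contains_cons, List.contains_nil, Bool.or_false,
        Bool.or_eq_true, beq_iff_eq] at hc ⊢
      tauto
    · rw [Bool.eq_iff_iff]
      simp only [List.contains_cons, List.contains_nil, Bool.or_false,
        Bool.or_eq_true, beq_iff_eq] at hc ⊢
      tauto

-- ===== VERDICT (by name: the statement is the Claim_ definition above) =====
theorem should_scan_file_py_spec : Claim_equal_should_scan_file_py := by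
  intro filename runtime _
  unfold Spec_should_scan_file_py should_scan_file_py should_scan_file_py_alt
  by_cases h1 : runtime == "python3.11" <;> by_cases h2 : runtime == "nodejs20" <;>
    simp only [h1, h2, if_true, if_false, Bool.false_eq_true]
  · rw [show PySem.Set.union
        (PySem.Set.ofList [".json", ".yaml", ".yml", ".sh", ".bat", ".txt", ".md"])
        (PySem.Set.ofList [".py", ".pyx", ".pyi"]) =
        ([".json", ".yaml", ".yml", ".sh", ".bat", ".txt", ".md", ".py", ".pyx", ".pyi"] : List String)
        from rfl, pv_mainS _ _ (by decide)]
    exact pvBridge_py _ _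
  · rw [show PySem.Set.union
        (PySem.Set.ofList [".json", ".yaml", ".yml", ".sh", ".bat", ".txt", ".md"])
        (PySem.Set.ofList [".py", ".pyx", ".pyi"]) =
        ([".json", ".yaml", ".yml", ".sh", ".bat", ".txt", ".md", ".py", ".pyx", ".pyi"] : List String)
        from rfl, pv_mainS _ _ (by decide)]
    exact pvBridge_py _ _
  · rw [show PySem.Set.union
        (PySem.Set.ofList [".json", ".yaml", ".yml", ".sh", ".bat", ".txt", ".md"])
        (PySem.Set.ofList [".js", ".ts", ".jsx", ".tsx", ".mjs", ".cjs"]) =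
        ([".json", ".yaml", ".yml", ".sh", ".bat", ".txt", ".md",
          ".js", ".ts", ".jsx", ".tsx", ".mjs", ".cjs"] : List String)
        from rfl, pv_mainS _ _ (by decide)]
    exact pvBridge_js _ _
  · rw [pv_mainS _ _ (by decide)]
    exact pvBridge_def _ _
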